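-- pv_equiv track=rewrite | github.com/yyxda/bishe | backend/app/utils/imap/imap_flag_utils.py | flags_to_status
-- ===== SOURCE A (Python) =====
-- from typing import Dict, List, Optional
--
-- def flags_to_status(flags: List[str]) -> Dict[str, bool]:
--     """将flags转换为状态字段。
--
--     Args:
--         flags: 原始flag列表。
--
--     Returns:
--         状态字段映射。
--     """
--     upper_flags = {flag.upper() for flag in flags}
--     return {
--         "is_read": "\\SEEN" in upper_flags,
--         "is_flagged": "\\FLAGGED" in upper_flags,
--         "is_answered": "\\ANSWERED" in upper_flags,
--         "is_deleted": "\\DELETED" in upper_flags,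
--         "is_draft": "\\DRAFT" in upper_flags,
--     }
-- ===== SOURCE B (Python) =====
-- from typing import Dict, List, Optional
--
-- FLAG_MAP = {
--     "\\SEEN": "is_read",
--     "\\FLAGGED": "is_flagged",
--     "\\ANSWERED": "is_answered",
--     "\\DELETED": "is_deleted",
--     "\\DRAFT": "is_draft",
-- }
--
-- def flags_to_status(flags: List[str]) -> Dict[str, bool]:
--     status = {
--         "is_read": False,
--         "is_flagged": False,
--         "is_answered": False,
--         "is_deleted": False,
--         "is_draft": False,
--     }
--     for flag in flags:
--         key = FLAG_MAP.get(flag.upper())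
--         if key is not None:
--             status[key] = True
--     return status
-- ===== Notes on version B (the rewrite author's own statement) =====
-- stated objective: idiomatic
-- what changed: B replaces A's set-comprehension plus five fixed membership tests with a module-level flag-to-field lookup table: the result dict starts with all five fields False and one pass over flags dispatches each uppercased flag through FLAG_MAP.get, setting the matched field True.
import Mathlib
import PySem

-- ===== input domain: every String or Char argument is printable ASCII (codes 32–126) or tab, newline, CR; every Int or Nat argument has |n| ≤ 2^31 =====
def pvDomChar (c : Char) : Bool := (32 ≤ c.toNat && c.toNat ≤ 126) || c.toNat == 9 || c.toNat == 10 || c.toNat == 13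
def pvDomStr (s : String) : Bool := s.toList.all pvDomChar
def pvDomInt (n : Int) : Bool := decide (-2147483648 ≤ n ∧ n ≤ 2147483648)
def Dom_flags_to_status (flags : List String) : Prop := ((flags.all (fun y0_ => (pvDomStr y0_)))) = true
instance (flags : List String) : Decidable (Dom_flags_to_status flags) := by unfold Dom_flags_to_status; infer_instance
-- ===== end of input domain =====

-- B replaces A's set-of-uppercased-flags + five fixed membership tests with a lookup-table
-- dispatch over the flags into a result dict initialised to all-False (idiomatic; same O(n) cost).

-- ===== PORT A =====
def flags_to_status (flags : List String) : List (String × Bool) :=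
  let upper_flags : PySem.Set String := PySem.Set.ofList (flags.map (fun flag => PySem.Str.upper flag))
  [("is_read", PySem.Set.contains upper_flags "\\SEEN"),
   ("is_flagged", PySem.Set.contains upper_flags "\\FLAGGED"),
   ("is_answered", PySem.Set.contains upper_flags "\\ANSWERED"),
   ("is_deleted", PySem.Set.contains upper_flags "\\DELETED"),
   ("is_draft", PySem.Set.contains upper_flags "\\DRAFT")]

-- ===== PORT B =====
def pvFlagMap : PySem.Dict String String :=
  PySem.Dict.ofList [("\\SEEN", "is_read"), ("\\FLAGGED", "is_flagged"),
                     ("\\ANSWERED", "is_answered"), ("\\DELETED", "is_deleted"),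
                     ("\\DRAFT", "is_draft")]

def flags_to_status_alt (flags : List String) : List (String × Bool) :=
  (flags.foldl (fun status flag =>
      match PySem.Dict.get? pvFlagMap (PySem.Str.upper flag) with
      | some key => PySem.Dict.insert status key true
      | none => status)
    (PySem.Dict.ofList [("is_read", false), ("is_flagged", false), ("is_answered", false),
                        ("is_deleted", false), ("is_draft", false)])).items

-- ===== PRECONDITION & SPEC =====
def Spec_flags_to_status (flags : List String) (out : List (String × Bool)) : Prop := out = flags_to_status_alt flags
instance (flags : List String) (out : List (String × Bool)) : Decidable (Spec_flags_to_status flags out) := by unfold Spec_flags_to_status; infer_instance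

-- ===== CLAIM (what is proved, stated in full; the proofs are below) =====
def Claim_equal_flags_to_status : Prop := ∀ (flags : List String), Dom_flags_to_status flags → Spec_flags_to_status flags (flags_to_status flags)

-- ===== LEMMAS AND PROOFS =====

-- the lookup table evaluated: each of the five flags, and the miss case
theorem pvGet_seen : PySem.Dict.get? pvFlagMap "\\SEEN" = some "is_read" := by decide
theorem pvGet_flagged : PySem.Dict.get? pvFlagMap "\\FLAGGED" = some "is_flagged" := by decide
theorem pvGet_answered : PySem.Dict.get? pvFlagMap "\\ANSWERED" = some "is_answered" := by decide
theorem pvGet_deleted : PySem.Dict.get? pvFlagMap "\\DELETED" = some "is_deleted" := by decide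
theorem pvGet_draft : PySem.Dict.get? pvFlagMap "\\DRAFT" = some "is_draft" := by decide

theorem pvGet_none (u : String) (h1 : u ≠ "\\SEEN") (h2 : u ≠ "\\FLAGGED")
    (h3 : u ≠ "\\ANSWERED") (h4 : u ≠ "\\DELETED") (h5 : u ≠ "\\DRAFT") :
    PySem.Dict.get? pvFlagMap u = none := by
  have e1 : ("\\SEEN" == u) = false := beq_eq_false_iff_ne.mpr (Ne.symm h1)
  have e2 : ("\\FLAGGED" == u) = false := beq_eq_false_iff_ne.mpr (Ne.symm h2)
  have e3 : ("\\ANSWERED" == u) = false := beq_eq_false_iff_ne.mpr (Ne.symm h3)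
  have e4 : ("\\DELETED" == u) = false := beq_eq_false_iff_ne.mpr (Ne.symm h4)
  have e5 : ("\\DRAFT" == u) = false := beq_eq_false_iff_ne.mpr (Ne.symm h5)
  simp [pvFlagMap, PySem.Dict.get?, PySem.Dict.ofList, PySem.Dict.update, PySem.Dict.insert,
        PySem.Dict.empty, PySem.Dict.contains, List.find?, e1, e2, e3, e4, e5]

-- loop invariant: folding B's step over `flags` from a status dict with the five fields
-- holding a,b,c,d,e yields each field OR-ed with membership of its flag among the uppercased flags
theorem pv_invariant (flags : List String) (a b c d e : Bool) :
    (flags.foldl (fun status flag =>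
        match PySem.Dict.get? pvFlagMap (PySem.Str.upper flag) with
        | some key => PySem.Dict.insert status key true
        | none => status)
      ⟨[("is_read", a), ("is_flagged", b), ("is_answered", c),
        ("is_deleted", d), ("is_draft", e)]⟩).items
    = [("is_read", a || (flags.map (fun flag => PySem.Str.upper flag)).contains "\\SEEN"),
       ("is_flagged", b || (flags.map (fun flag => PySem.Str.upper flag)).contains "\\FLAGGED"),
       ("is_answered", c || (flags.map (fun flag => PySem.Str.upper flag)).contains "\\ANSWERED"),
       ("is_deleted", d || (flags.map (fun flag => PySem.Str.upper flag)).contains "\\DELETED"),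
       ("is_draft", e || (flags.map (fun flag => PySem.Str.upper flag)).contains "\\DRAFT")] := by
  induction flags generalizing a b c d e with
  | nil => simp [PySem.Dict.items]
  | cons f rest ih =>
    simp only [List.foldl_cons, List.map_cons, List.contains_cons]
    by_cases h1 : PySem.Str.upper f = "\\SEEN"
    · rw [h1, pvGet_seen]
      simp only [show (PySem.Dict.insert ⟨[("is_read", a), ("is_flagged", b), ("is_answered", c),
        ("is_deleted", d), ("is_draft", e)]⟩ "is_read" true) = ⟨[("is_read", true), ("is_flagged", b),
        ("is_answered", c), ("is_deleted", d), ("is_draft", e)]⟩ by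
          simp [PySem.Dict.insert, PySem.Dict.contains]]
      simp [ih, h1]
    · by_cases h2 : PySem.Str.upper f = "\\FLAGGED"
      · rw [h2, pvGet_flagged]
        simp only [show (PySem.Dict.insert ⟨[("is_read", a), ("is_flagged", b), ("is_answered", c),
          ("is_deleted", d), ("is_draft", e)]⟩ "is_flagged" true) = ⟨[("is_read", a), ("is_flagged", true),
          ("is_answered", c), ("is_deleted", d), ("is_draft", e)]⟩ by
            simp [PySem.Dict.insert, PySem.Dict.contains]]
        simp [ih, h1, h2]
      · by_cases h3 : PySem.Str.upper f = "\\ANSWERED"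
        · rw [h3, pvGet_answered]
          simp only [show (PySem.Dict.insert ⟨[("is_read", a), ("is_flagged", b), ("is_answered", c),
            ("is_deleted", d), ("is_draft", e)]⟩ "is_answered" true) = ⟨[("is_read", a), ("is_flagged", b),
            ("is_answered", true), ("is_deleted", d), ("is_draft", e)]⟩ by
              simp [PySem.Dict.insert, PySem.Dict.contains]]
          simp [ih, h1, h2, h3]
        · by_cases h4 : PySem.Str.upper f = "\\DELETED"
          · rw [h4, pvGet_deleted]
            simp only [show (PySem.Dict.insert ⟨[("is_read", a), ("is_flagged", b), ("is_answered", c),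
              ("is_deleted", d), ("is_draft", e)]⟩ "is_deleted" true) = ⟨[("is_read", a), ("is_flagged", b),
              ("is_answered", c), ("is_deleted", true), ("is_draft", e)]⟩ by
                simp [PySem.Dict.insert, PySem.Dict.contains]]
            simp [ih, h1, h2, h3, h4]
          · by_cases h5 : PySem.Str.upper f = "\\DRAFT"
            · rw [h5, pvGet_draft]
              simp only [show (PySem.Dict.insert ⟨[("is_read", a), ("is_flagged", b), ("is_answered", c),
                ("is_deleted", d), ("is_draft", e)]⟩ "is_draft" true) = ⟨[("is_read", a), ("is_flagged", b),
                ("is_answered", c), ("is_deleted", d), ("is_draft", true)]⟩ by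
                  simp [PySem.Dict.insert, PySem.Dict.contains]]
              simp [ih, h1, h2, h3, h4, h5]
            · rw [pvGet_none _ h1 h2 h3 h4 h5]
              have e1 : ("\\SEEN" == PySem.Str.upper f) = false := beq_eq_false_iff_ne.mpr (Ne.symm h1)
              have e2 : ("\\FLAGGED" == PySem.Str.upper f) = false := beq_eq_false_iff_ne.mpr (Ne.symm h2)
              have e3 : ("\\ANSWERED" == PySem.Str.upper f) = false := beq_eq_false_iff_ne.mpr (Ne.symm h3)
              have e4 : ("\\DELETED" == PySem.Str.upper f) = false := beq_eq_false_iff_ne.mpr (Ne.symm h4)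
              have e5 : ("\\DRAFT" == PySem.Str.upper f) = false := beq_eq_false_iff_ne.mpr (Ne.symm h5)
              simp [ih, e1, e2, e3, e4, e5]

theorem pv_set_contains (l : List String) (x : String) :
    PySem.Set.contains (PySem.Set.ofList l) x = l.contains x := by
  by_cases h : x ∈ l <;>
    simp [PySem.Set.contains_eq_listContains, PySem.Set.mem_ofList, h]

theorem pv_init_eq : (PySem.Dict.ofList [("is_read", false), ("is_flagged", false),
    ("is_answered", false), ("is_deleted", false), ("is_draft", false)] : PySem.Dict String Bool)
    = ⟨[("is_read", false), ("is_flagged", false), ("is_answered", false),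
        ("is_deleted", false), ("is_draft", false)]⟩ := by decide

-- ===== VERDICT (by name: the statement is the Claim_ definition above) =====
theorem flags_to_status_spec : Claim_equal_flags_to_status := by
  intro flags _
  unfold Spec_flags_to_status flags_to_status flags_to_status_alt
  rw [pv_init_eq, pv_invariant]
  simp [pv_set_contains]
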